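-- pv_equiv track=rewrite | github.com/yashwalker7/GFG-POTD | GFG/String rp or pr.py | solve
-- ===== SOURCE A (Python) =====
-- def solve (X, Y, S):
--     #code here
--     if X>=Y: order = [('pr', X), ('rp', Y)]
--     else: order = [('rp', Y), ('pr',X)]
--     a=0
--     for (c0,c1), score in order:
--         Z, ZS = len(S), []
--         for i in range(Z):
--             ZS.append(S[i])
--             if S[i] == c1 and len(ZS)>1 and ZS[-2]==c0:
--                 a += score
--                 ZS.pop(); ZS.pop()
--         S = ZS
--     return a
-- ===== SOURCE B (Python) =====
-- def solve(X, Y, S):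
--     # One pass with integer counters: no stacks, no second scan.
--     if X >= Y:
--         op, cl, pri, oth = 'p', 'r', X, Y
--     else:
--         op, cl, pri, oth = 'r', 'p', Y, X
--     total = 0
--     pending = 0   # unmatched openers in the current p/r run
--     loose = 0     # closers in the current run that found no opener
--     for ch in S:
--         if ch == op:
--             pending += 1
--         elif ch == cl:
--             if pending > 0:
--                 pending -= 1
--                 total += pri
--             else:
--                 loose += 1
--         else:
--             total += oth * min(pending, loose)
--             pending = 0
--             loose = 0
--     return total + oth * min(pending, loose)
-- ===== Notes on version B (the rewrite author's own statement) =====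
-- stated objective: simpler
-- what changed: Replaced A's two stack-based removal passes (building and re-scanning character lists) by a single scan that keeps only two integer counters per p/r run, scoring the priority pair greedily and the other pair as min(leftover openers, leftover closers) at each run boundary.
import Mathlib
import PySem

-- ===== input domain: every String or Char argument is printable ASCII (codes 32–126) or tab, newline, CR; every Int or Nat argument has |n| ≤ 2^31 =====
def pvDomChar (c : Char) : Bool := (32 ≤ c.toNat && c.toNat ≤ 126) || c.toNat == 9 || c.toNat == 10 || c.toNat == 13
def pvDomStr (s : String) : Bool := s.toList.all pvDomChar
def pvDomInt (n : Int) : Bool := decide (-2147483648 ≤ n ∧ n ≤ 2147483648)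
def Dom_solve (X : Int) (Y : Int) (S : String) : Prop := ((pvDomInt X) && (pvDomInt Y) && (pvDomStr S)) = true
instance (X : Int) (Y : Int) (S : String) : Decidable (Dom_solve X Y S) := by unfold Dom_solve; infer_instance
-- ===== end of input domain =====

-- B replaces A's two stack-removal passes by a single scan with two integer counters per p/r run (simpler; return value only, A rebinds its local S).

-- ===== PORT A =====
-- one step of A's inner loop: append S[i], then possibly pop a matched pair and score
def stepA (c0 c1 : Char) (score : Int) (st : List Char × Int) (ch : Char) : List Char × Int :=
  let ZS' := st.1 ++ [ch]
  if ch = c1 ∧ ZS'.length > 1 ∧ PySem.List.pyGet? ZS' (-2) = some c0 then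
    (ZS'.dropLast.dropLast, st.2 + score)
  else
    (ZS', st.2)

def solve (X : Int) (Y : Int) (S : String) : Int :=
  let order := if X ≥ Y then [(('p','r'), X), (('r','p'), Y)] else [(('r','p'), Y), (('p','r'), X)]
  (order.foldl (fun (st : Int × List Char) pr =>
      let res := st.2.foldl (stepA pr.1.1 pr.1.2 pr.2) (([] : List Char), st.1)
      (res.2, res.1)) (0, S.toList)).1

-- ===== PORT B =====
-- one step of B's scan: counters (total, pending openers, loose closers)
def stepB (op cl : Char) (pri oth : Int) (st : Int × Nat × Nat) (ch : Char) : Int × Nat × Nat :=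
  if ch = op then (st.1, st.2.1 + 1, st.2.2)
  else if ch = cl then
    (if st.2.1 > 0 then (st.1 + pri, st.2.1 - 1, st.2.2) else (st.1, st.2.1, st.2.2 + 1))
  else (st.1 + oth * ((min st.2.1 st.2.2 : Nat) : Int), 0, 0)

def solve_alt (X : Int) (Y : Int) (S : String) : Int :=
  let q := if X ≥ Y then ('p', 'r', X, Y) else ('r', 'p', Y, X)
  let r := S.toList.foldl (stepB q.1 q.2.1 q.2.2.1 q.2.2.2) (0, 0, 0)
  r.1 + q.2.2.2 * ((min r.2.1 r.2.2 : Nat) : Int)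

-- ===== PRECONDITION & SPEC =====
def Spec_solve (X : Int) (Y : Int) (S : String) (out : Int) : Prop := out = solve_alt X Y S
instance (X : Int) (Y : Int) (S : String) (out : Int) : Decidable (Spec_solve X Y S out) := by unfold Spec_solve; infer_instance

-- ===== CLAIM (what is proved, stated in full; the proofs are below) =====
def Claim_equal_solve : Prop := ∀ (X : Int) (Y : Int) (S : String), Dom_solve X Y S → Spec_solve X Y S (solve X Y S)

-- ===== LEMMAS AND PROOFS =====

-- B's full result for a suffix, starting with given counters
def Brun (op cl : Char) (pri oth : Int) (l : List Char) (p c : Nat) : Int :=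
  let r := l.foldl (stepB op cl pri oth) (0, p, c)
  r.1 + oth * ((min r.2.1 r.2.2 : Nat) : Int)

-- accumulator shift for A's loop
lemma stepA_shift (c0 c1 : Char) (sc : Int) (l : List Char) : ∀ (zs : List Char) (a : Int),
    l.foldl (stepA c0 c1 sc) (zs, a)
      = ((l.foldl (stepA c0 c1 sc) (zs, 0)).1, a + (l.foldl (stepA c0 c1 sc) (zs, 0)).2) := by
  induction l with
  | nil => intro zs a; simp
  | cons x t ih =>
    intro zs a
    simp only [List.foldl_cons, stepA]
    split_ifs with h
    · rw [ih _ (a + sc), ih _ (0 + sc)]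
      simp only [Prod.mk.injEq]
      exact ⟨trivial, by ring⟩
    · exact ih _ a

-- accumulator shift for B's loop (counters do not depend on the total)
lemma stepB_shift (op cl : Char) (pri oth : Int) (l : List Char) : ∀ (p c : Nat) (a : Int),
    l.foldl (stepB op cl pri oth) (a, p, c)
      = ((l.foldl (stepB op cl pri oth) (0, p, c)).1 + a,
         (l.foldl (stepB op cl pri oth) (0, p, c)).2) := by
  induction l with
  | nil => intro p c a; simp
  | cons x t ih =>
    intro p c a
    simp only [List.foldl_cons, stepB]
    split_ifs with h1 h2 h3
    · exact ih _ _ a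
    · rw [ih _ _ (a + pri), ih _ _ (0 + pri)]
      simp only [Prod.mk.injEq]
      exact ⟨by ring, trivial⟩
    · exact ih _ _ a
    · rw [ih _ _ (a + _), ih _ _ (0 + _)]
      simp only [Prod.mk.injEq]
      exact ⟨by ring, trivial⟩

-- Python's ZS[-2] after ZS.append(ch) is the old top of the stack
lemma pyGet?_concat_neg_two (l : List Char) (x : Char) :
    PySem.List.pyGet? (l ++ [x]) (-2) = l.getLast? := by
  cases l with
  | nil => rfl
  | cons y t =>
    rw [PySem.List.pyGet?_neg_ofNat _ 2 (by omega) (by simp)]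
    rw [show (y :: t ++ [x] : List Char) = (y :: t) ++ [x] by simp,
        show ((y :: t) ++ [x]).length - 2 = t.length by simp,
        List.getElem?_append_left (by simp), List.getLast?_eq_getElem?]
    simp

lemma rep_succ_concat (P : List Char) (n : Nat) (x : Char) :
    P ++ List.replicate (n + 1) x = (P ++ List.replicate n x) ++ [x] := by
  simp [List.replicate_succ']

-- pass 2 pushes closers untouched
lemma p2_cls (op cl : Char) (oth : Int) (hne : op ≠ cl) (i : Nat) : ∀ (Q : List Char) (a : Int),
    (List.replicate i cl).foldl (stepA cl op oth) (Q, a) = (Q ++ List.replicate i cl, a) := by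
  induction i with
  | zero => intro Q a; simp
  | succ k ih =>
    intro Q a
    rw [List.replicate_succ, List.foldl_cons]
    have hclop : ¬ (cl = op) := fun h => hne (Eq.symm h)
    have hstep : stepA cl op oth (Q, a) cl = (Q ++ [cl], a) := by
      simp [stepA, hclop]
    rw [hstep, ih]
    simp

-- pass 2 over the openers of a residue: exactly min i j matches
lemma p2_ops (op cl : Char) (oth : Int) (hne : op ≠ cl) (j : Nat) : ∀ (i : Nat) (Q : List Char) (a : Int),
    Q.getLast? ≠ some cl →
    (List.replicate j op).foldl (stepA cl op oth) (Q ++ List.replicate i cl, a)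
      = (Q ++ List.replicate (i - min i j) cl ++ List.replicate (j - min i j) op,
         a + oth * ((min i j : Nat) : Int)) := by
  induction j with
  | zero => intro i Q a _; simp
  | succ k ih =>
    intro i Q a hQ
    rw [List.replicate_succ, List.foldl_cons]
    cases i with
    | zero =>
      have hstep : stepA cl op oth (Q ++ List.replicate 0 cl, a) op = (Q ++ [op], a) := by
        simp [stepA, pyGet?_concat_neg_two, hQ]
      rw [hstep]
      have := ih 0 (Q ++ [op]) a (by simp [hne])
      simp only [List.replicate_zero, List.append_nil] at this ⊢
      rw [this]
      simp
      exact (List.replicate_succ ..).symm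
    | succ m =>
      have hstep : stepA cl op oth (Q ++ List.replicate (m + 1) cl, a) op
          = (Q ++ List.replicate m cl, a + oth) := by
        rw [rep_succ_concat]
        simp only [stepA]
        rw [pyGet?_concat_neg_two, List.getLast?_concat]
        simp
        omega
      rw [hstep, ih m Q (a + oth) hQ]
      have hm : min (m + 1) (k + 1) = min m k + 1 := by omega
      simp only [Prod.mk.injEq]
      refine ⟨?_, ?_⟩
      · simp [hm]
      · rw [hm]; push_cast; ring
  
lemma p2_block (op cl : Char) (oth : Int) (hne : op ≠ cl) (i j : Nat) (Q : List Char) (a : Int)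
    (hQ : Q.getLast? ≠ some cl) :
    (List.replicate i cl ++ List.replicate j op).foldl (stepA cl op oth) (Q, a)
      = (Q ++ List.replicate (i - min i j) cl ++ List.replicate (j - min i j) op,
         a + oth * ((min i j : Nat) : Int)) := by
  rw [List.foldl_append, p2_cls op cl oth hne, p2_ops op cl oth hne j i Q a hQ]

lemma p2_block_st (op cl : Char) (oth : Int) (hne : op ≠ cl) (i j : Nat) (st : List Char × Int)
    (hQ : st.1.getLast? ≠ some cl) :
    (List.replicate i cl ++ List.replicate j op).foldl (stepA cl op oth) st
      = (st.1 ++ List.replicate (i - min i j) cl ++ List.replicate (j - min i j) op,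
         st.2 + oth * ((min i j : Nat) : Int)) := by
  obtain ⟨Q, a⟩ := st
  exact p2_block op cl oth hne i j Q a hQ

lemma Brun_cons_op (op cl : Char) (pri oth : Int) (t : List Char) (p c : Nat) :
    Brun op cl pri oth (op :: t) p c = Brun op cl pri oth t (p + 1) c := by
  simp [Brun, stepB]

lemma Brun_cons_cl_pos (op cl : Char) (pri oth : Int) (hne : op ≠ cl) (t : List Char) (p c : Nat) :
    Brun op cl pri oth (cl :: t) (p + 1) c = pri + Brun op cl pri oth t p c := by
  have hclop : ¬ (cl = op) := fun h => hne (Eq.symm h)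
  unfold Brun
  rw [List.foldl_cons, show stepB op cl pri oth (0, p + 1, c) cl = (pri, p, c) from by
        simp [stepB, hclop],
      stepB_shift op cl pri oth t p c pri]
  ring

lemma Brun_cons_cl_zero (op cl : Char) (pri oth : Int) (hne : op ≠ cl) (t : List Char) (c : Nat) :
    Brun op cl pri oth (cl :: t) 0 c = Brun op cl pri oth t 0 (c + 1) := by
  have hclop : ¬ (cl = op) := fun h => hne (Eq.symm h)
  simp [Brun, stepB, hclop]

lemma Brun_cons_other (op cl : Char) (pri oth : Int) (t : List Char) (ch : Char)
    (hop : ¬ ch = op) (hcl : ¬ ch = cl) (p c : Nat) :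
    Brun op cl pri oth (ch :: t) p c = oth * ((min p c : Nat) : Int) + Brun op cl pri oth t 0 0 := by
  unfold Brun
  rw [List.foldl_cons, show stepB op cl pri oth (0, p, c) ch = (oth * ((min p c : Nat) : Int), 0, 0) from by
        simp [stepB, hop, hcl],
      stepB_shift op cl pri oth t 0 0 _]
  ring

lemma main_lemma (op cl : Char) (pri oth : Int) (hne : op ≠ cl) (l : List Char) :
    ∀ (P : List Char) (i j : Nat) (a : Int),
    P.getLast? ≠ some op →
    (P.foldl (stepA cl op oth) (([] : List Char), 0)).1.getLast? ≠ some cl →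
    (((l.foldl (stepA op cl pri) (P ++ List.replicate i cl ++ List.replicate j op, a)).1).foldl
        (stepA cl op oth)
        (([] : List Char), (l.foldl (stepA op cl pri) (P ++ List.replicate i cl ++ List.replicate j op, a)).2)).2
      = a + (P.foldl (stepA cl op oth) (([] : List Char), 0)).2 + Brun op cl pri oth l j i := by
  induction l with
  | nil =>
    intro P i j a hP hQ
    simp only [List.foldl_nil]
    rw [List.append_assoc, List.foldl_append, stepA_shift cl op oth P [] a,
        p2_block op cl oth hne i j _ _ hQ]
    simp [Brun, Nat.min_comm i j]
  | cons ch t ih =>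
    intro P i j a hP hQ
    simp only [List.foldl_cons]
    by_cases hop : ch = op
    · rw [hop]
      have hstep : stepA op cl pri (P ++ List.replicate i cl ++ List.replicate j op, a) op
          = (P ++ List.replicate i cl ++ List.replicate (j + 1) op, a) := by
        simp [stepA, hne, List.replicate_succ', List.append_assoc]
      rw [hstep, ih P i (j + 1) a hP hQ, Brun_cons_op]
    · by_cases hcl : ch = cl
      · rw [hcl]
        cases j with
        | zero =>
          have hlast : (P ++ List.replicate i cl).getLast? ≠ some op := by
            cases i with
            | zero => simpa using hP
            | succ m =>
              rw [rep_succ_concat, List.getLast?_concat]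
              simp
              exact fun h => hne (Eq.symm h)
          have hstep : stepA op cl pri (P ++ List.replicate i cl ++ List.replicate 0 op, a) cl
              = (P ++ List.replicate (i + 1) cl ++ List.replicate 0 op, a) := by
            simp only [stepA, List.replicate_zero, List.append_nil]
            rw [pyGet?_concat_neg_two, if_neg]
            · simp [List.replicate_succ', List.append_assoc]
            · intro hcc
              exact hlast hcc.2.2
          rw [hstep, ih P (i + 1) 0 a hP hQ, Brun_cons_cl_zero op cl pri oth hne]
        | succ k =>
          have hR : P ++ List.replicate i cl ++ List.replicate (k + 1) op
              = (P ++ List.replicate i cl ++ List.replicate k op) ++ [op] := by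
            simp [List.replicate_succ', List.append_assoc]
          have hstep : stepA op cl pri (P ++ List.replicate i cl ++ List.replicate (k + 1) op, a) cl
              = (P ++ List.replicate i cl ++ List.replicate k op, a + pri) := by
            rw [hR]
            simp only [stepA]
            rw [pyGet?_concat_neg_two, List.getLast?_concat]
            simp
            omega
          rw [hstep, ih P i k (a + pri) hP hQ, Brun_cons_cl_pos op cl pri oth hne]
          ring
      · -- ch is neither op nor cl: the run ends, a fresh run starts after ch
        have hstep : stepA op cl pri (P ++ List.replicate i cl ++ List.replicate j op, a) ch
            = ((P ++ List.replicate i cl ++ List.replicate j op) ++ [ch], a) := by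
          simp [stepA, hcl]
        have hsplit : (((P ++ List.replicate i cl ++ List.replicate j op) ++ [ch]).foldl
              (stepA cl op oth) (([] : List Char), 0))
            = (((P.foldl (stepA cl op oth) (([] : List Char), 0)).1
                  ++ List.replicate (i - min i j) cl ++ List.replicate (j - min i j) op) ++ [ch],
               (P.foldl (stepA cl op oth) (([] : List Char), 0)).2
                  + oth * ((min i j : Nat) : Int)) := by
          rw [show (P ++ List.replicate i cl ++ List.replicate j op) ++ [ch]
                = P ++ ((List.replicate i cl ++ List.replicate j op) ++ [ch]) from by
                simp [List.append_assoc]]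
          rw [List.foldl_append, List.foldl_append,
              p2_block_st op cl oth hne i j _ hQ]
          simp only [List.foldl_cons, List.foldl_nil]
          rw [show ∀ st : List Char × Int, stepA cl op oth st ch = (st.1 ++ [ch], st.2) from
              fun st => by simp [stepA, hop]]
        have hP' : ((P ++ List.replicate i cl ++ List.replicate j op) ++ [ch]).getLast? ≠ some op := by
          rw [List.getLast?_concat]
          simp [hop]
        have hQ' : (((P ++ List.replicate i cl ++ List.replicate j op) ++ [ch]).foldl
              (stepA cl op oth) (([] : List Char), 0)).1.getLast? ≠ some cl := by
          rw [hsplit, List.getLast?_concat]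
          simp [hcl]
        have hstack : (P ++ List.replicate i cl ++ List.replicate j op) ++ [ch]
            = ((P ++ List.replicate i cl ++ List.replicate j op) ++ [ch])
                ++ List.replicate 0 cl ++ List.replicate 0 op := by simp
        rw [hstep, hstack, ih _ 0 0 a hP' hQ', hsplit,
            Brun_cons_other op cl pri oth t ch hop hcl, Nat.min_comm j i]
        ring

-- ===== VERDICT (by name: the statement is the Claim_ definition above) =====
theorem solve_spec : Claim_equal_solve := by
  unfold Claim_equal_solve
  intro X Y S _
  unfold Spec_solve solve solve_alt
  by_cases hXY : X ≥ Y
  · simp only [if_pos hXY, List.foldl_cons, List.foldl_nil]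
    have h := main_lemma 'p' 'r' X Y (by decide) S.toList [] 0 0 0 (by simp) (by simp)
    simp only [List.replicate_zero, List.append_nil, List.foldl_nil] at h
    rw [h]
    simp [Brun]
  · simp only [if_neg hXY, List.foldl_cons, List.foldl_nil]
    have h := main_lemma 'r' 'p' Y X (by decide) S.toList [] 0 0 0 (by simp) (by simp)
    simp only [List.replicate_zero, List.append_nil, List.foldl_nil] at h
    rw [h]
    simp [Brun]
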